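-- pv_equiv track=rewrite | github.com/harelm4/Embible-Backend | src/evaluation/Classes/CharHitAtK.py | _get_missing_idxs
-- ===== SOURCE A (Python) =====
-- from typing import List
--
-- def _get_missing_idxs(pred_idx: int, text: str) -> List[int]:
--     """
--     for word with missing parts at index `pred_idx` ,
--     this function returns a list of the indexes that are missing in it relative to the start of the word
--     :param pred_idx: index of a word with missing parts (out of just the missing words)
--     :param text: the input text of the prediction
--     :return: list of missing chars indexes
--     """
--     missing_word_count = -1
--     split = text.split(' ')
--     for i, word in enumerate(split):
--         if '?' in word:
--             missing_word_count += 1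
--             if pred_idx == missing_word_count:
--                 return [c_i for c_i, c in enumerate(word) if c=='?']
-- ===== SOURCE B (Python) =====
-- def _get_missing_idxs(pred_idx: int, text: str):
--     """Single character-level sweep: never splits the text into words. Tracks the
--     start offset of the current word and the start of the word owning the last
--     group; each '?' either opens a new group or extends the last one."""
--     groups = []            # per missing word, the list of '?' offsets
--     start = 0              # start position of the current word
--     last_start = -1        # start position of the word owning groups[-1]
--     for p, c in enumerate(text):
--         if c == ' ':
--             start = p + 1
--         elif c == '?':
--             if last_start != start:
--                 groups.append([p - start])
--                 last_start = start
--             else: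
--                 groups[-1].append(p - start)
--     if 0 <= pred_idx < len(groups):
--         return groups[pred_idx]
-- ===== Notes on version B (the rewrite author's own statement) =====
-- stated objective: alternative
-- what changed: Replaces the split-into-words scan with its per-word counter by a single character-level sweep over the raw text that never materialises words: it groups '?' offsets by the tracked start position of the current word, then indexes the resulting group list.
import Mathlib
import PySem

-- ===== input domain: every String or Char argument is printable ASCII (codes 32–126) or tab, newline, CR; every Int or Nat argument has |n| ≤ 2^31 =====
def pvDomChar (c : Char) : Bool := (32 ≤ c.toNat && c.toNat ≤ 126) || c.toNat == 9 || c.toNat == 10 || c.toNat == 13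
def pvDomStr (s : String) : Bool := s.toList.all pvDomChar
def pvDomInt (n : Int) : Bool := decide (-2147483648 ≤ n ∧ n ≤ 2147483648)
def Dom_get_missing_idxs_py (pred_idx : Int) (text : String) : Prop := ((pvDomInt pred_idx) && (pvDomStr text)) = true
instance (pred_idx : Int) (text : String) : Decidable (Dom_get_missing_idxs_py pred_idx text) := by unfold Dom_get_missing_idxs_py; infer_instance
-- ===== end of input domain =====

-- B replaces A's split-into-words scan by a single character-level sweep that groups
-- '?' offsets by the tracked start position of the current word (objective: alternative).

-- ===== PORT A =====
-- [c_i for c_i, c in enumerate(word) if c == '?']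
def pvQmarkIdxs (w : List Char) : List Int :=
  ((PySem.List.enumerate w 0).filter (fun p => p.2 == '?')).map (·.1)

-- the for-loop over enumerate(split) with missing_word_count, early return, implicit None at the end
def pvGoA (pred_idx : Int) : List (List Char) → Int → Option (List Int)
  | [], _ => none
  | w :: ws, cnt =>
    if PySem.Chars.isIn ['?'] w then
      if pred_idx == cnt + 1 then some (pvQmarkIdxs w)
      else pvGoA pred_idx ws (cnt + 1)
    else pvGoA pred_idx ws cnt

def get_missing_idxs_py (pred_idx : Int) (text : String) : Option (List Int) :=
  pvGoA pred_idx (PySem.Chars.splitOn text.toList [' ']) (-1)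

-- ===== PORT B =====
-- the loop body of Source B: state (start, last_start, groups), one step per character
def pvStepB (st : Int × Int × List (List Int)) (pc : Int × Char) : Int × Int × List (List Int) :=
  if pc.2 = ' ' then (pc.1 + 1, st.2.1, st.2.2)
  else if pc.2 = '?' then
    if st.2.1 ≠ st.1 then (st.1, st.1, st.2.2 ++ [[pc.1 - st.1]])
    else (st.1, st.2.1, st.2.2.dropLast ++ [st.2.2.getLastD [] ++ [pc.1 - st.1]])
  else st

def get_missing_idxs_py_alt (pred_idx : Int) (text : String) : Option (List Int) :=
  let st := (PySem.List.enumerate text.toList 0).foldl pvStepB (0, -1, [])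
  let groups := st.2.2
  if 0 ≤ pred_idx ∧ pred_idx < (groups.length : Int) then groups[pred_idx.toNat]? else none

-- ===== PRECONDITION & SPEC =====
def Spec_get_missing_idxs_py (pred_idx : Int) (text : String) (out : Option (List Int)) : Prop := out = get_missing_idxs_py_alt pred_idx text
instance (pred_idx : Int) (text : String) (out : Option (List Int)) : Decidable (Spec_get_missing_idxs_py pred_idx text out) := by unfold Spec_get_missing_idxs_py; infer_instance

-- ===== CLAIM (what is proved, stated in full; the proofs are below) =====
def Claim_equal_get_missing_idxs_py : Prop := ∀ (pred_idx : Int) (text : String), Dom_get_missing_idxs_py pred_idx text → Spec_get_missing_idxs_py pred_idx text (get_missing_idxs_py pred_idx text)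

-- ===== LEMMAS AND PROOFS =====

-- ---- A side: the counter scan returns the (pred_idx - cnt - 1)-th missing word's indexes ----
theorem pvGoA_eq (pred_idx : Int) (ws : List (List Char)) (cnt : Int) :
    pvGoA pred_idx ws cnt =
      (if 0 ≤ pred_idx - cnt - 1 ∧ pred_idx - cnt - 1 < ((ws.filter (fun w => PySem.Chars.isIn ['?'] w)).length : Int) then
        ((ws.filter (fun w => PySem.Chars.isIn ['?'] w))[(pred_idx - cnt - 1).toNat]?).map pvQmarkIdxs
      else none) := by
  induction ws generalizing cnt with
  | nil => simp [pvGoA]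
  | cons w ws ih =>
    by_cases hq : PySem.Chars.isIn ['?'] w = true
    · rw [pvGoA, if_pos hq, List.filter_cons, if_pos hq]
      by_cases he : pred_idx = cnt + 1
      · subst he
        simp
      · rw [if_neg (by simpa using he), ih (cnt + 1)]
        by_cases hlt : 0 ≤ pred_idx - (cnt + 1) - 1 ∧
            pred_idx - (cnt + 1) - 1 < ((ws.filter (fun w => PySem.Chars.isIn ['?'] w)).length : Int)
        · rw [if_pos hlt, if_pos (by simp only [List.length_cons]; push_cast; omega)]
          have hk : (pred_idx - cnt - 1).toNat = (pred_idx - (cnt + 1) - 1).toNat + 1 := by omega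
          rw [hk, List.getElem?_cons_succ]
        · rw [if_neg hlt, if_neg (by simp only [List.length_cons]; push_cast; omega)]
    · rw [pvGoA, if_neg hq, List.filter_cons, if_neg hq, ih cnt]

-- ---- bridge: PySem.Chars.splitOn with a single-char separator is Mathlib's List.splitOn ----
theorem pvHeadTail {A : Type} [Inhabited A] (l : List A) (h : l ≠ []) :
    l.headI :: l.tail = l := by
  cases l with
  | nil => exact absurd rfl h
  | cons a l => rfl

theorem pvGo_eq (c : Char) (fuel : Nat) (l cur : List Char) (acc : List (List Char))
    (h : l.length < fuel) :
    PySem.Chars.splitOn.go [c] fuel l cur acc =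
      acc.reverse ++ (cur.reverse ++ (List.splitOnP (· == c) l).headI) ::
        (List.splitOnP (· == c) l).tail := by
  induction fuel generalizing l cur acc with
  | zero => omega
  | succ fuel ih =>
    cases l with
    | nil => simp [PySem.Chars.splitOn.go, List.splitOnP_nil]
    | cons x rest =>
      rw [PySem.Chars.splitOn.go]
      by_cases hx : x = c
      · subst hx
        have hpre : List.isPrefixOf [x] (x :: rest) = true := by
          simp [List.isPrefixOf]
        rw [if_pos hpre]
        simp only [List.length_singleton, List.drop_one, List.tail_cons]
        rw [ih rest [] (cur.reverse :: acc) (by simpa using Nat.lt_of_succ_lt_succ h)]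
        rw [List.splitOnP_cons, if_pos (by simp)]
        simp [pvHeadTail _ (List.splitOnP_ne_nil (· == x) rest)]
      · have hpre : List.isPrefixOf [c] (x :: rest) = false := by
          simp [List.isPrefixOf, Ne.symm hx]
        rw [if_neg (by simp [hpre])]
        rw [ih rest (x :: cur) acc (by simpa using Nat.lt_of_succ_lt_succ h)]
        rw [List.splitOnP_cons, if_neg (by simp [hx]),
          ← pvHeadTail _ (List.splitOnP_ne_nil (· == c) rest), List.modifyHead_cons]
        simp

theorem pvSplitOn_eq (c : Char) (l : List Char) :
    PySem.Chars.splitOn l [c] = List.splitOn c l := by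
  rw [PySem.Chars.splitOn, pvGo_eq c (l.length + 1) l [] [] (by omega)]
  simp [List.splitOn, pvHeadTail _ (List.splitOnP_ne_nil (· == c) l)]

-- words produced by splitOnP contain no separator
theorem pvMem_splitOnP (p : Char → Bool) (l : List Char) :
    ∀ w ∈ List.splitOnP p l, ∀ x ∈ w, p x = false := by
  induction l with
  | nil => intro w hw x hx; rw [List.splitOnP_nil] at hw; simp at hw; simp [hw] at hx
  | cons a l ih =>
    intro w hw x hx
    rw [List.splitOnP_cons] at hw
    by_cases hp : p a = true
    · rw [if_pos hp] at hw
      rcases List.mem_cons.mp hw with h | h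
      · simp [h] at hx
      · exact ih w h x hx
    · rw [if_neg hp] at hw
      obtain ⟨hd, tl, hsp⟩ := List.exists_cons_of_ne_nil (List.splitOnP_ne_nil p l)
      rw [hsp, List.modifyHead_cons] at hw
      rcases List.mem_cons.mp hw with h | h
      · subst h
        rcases List.mem_cons.mp hx with h | h
        · subst h; exact Bool.eq_false_iff.mpr hp
        · exact ih hd (by rw [hsp]; exact List.mem_cons_self) x h
      · exact ih w (by rw [hsp]; exact List.mem_cons.mpr (Or.inr h)) x hx

-- '?' in word ↔ the membership test
theorem pvIsIn_iff (w : List Char) : PySem.Chars.isIn ['?'] w = true ↔ '?' ∈ w := by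
  rw [PySem.Chars.isIn_iff_infix]
  constructor
  · intro h; exact h.mem (by simp)
  · intro h
    obtain ⟨s, t, rfl⟩ := List.append_of_mem h
    exact ⟨s, t, by simp⟩

-- ---- B side: characterising the character sweep ----

-- shifting the enumeration start cancels against the subtracted offset
theorem pvEnumShift (cs : List Char) (a b : Int) :
    PySem.List.enumerate cs (a + b) = (PySem.List.enumerate cs a).map (fun q => (q.1 + b, q.2)) := by
  induction cs generalizing a with
  | nil => simp [PySem.List.enumerate_nil]
  | cons c cs ih =>
    rw [PySem.List.enumerate_cons, PySem.List.enumerate_cons, List.map_cons,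
      show a + b + 1 = (a + 1) + b by ring, ih]

theorem pvOffsets_eq (cs : List Char) (s : Int) :
    ((PySem.List.enumerate cs s).filter (fun q => q.2 == '?')).map (·.1 - s) = pvQmarkIdxs cs := by
  rw [show s = 0 + s by ring, pvEnumShift, pvQmarkIdxs, List.filter_map, List.map_map]
  simp only [Function.comp_def]
  congr 1
  funext q
  ring

-- inside the word that owns the last group (last_start = start): each '?' extends the last group
theorem pvSweepIn (cs : List Char) (h : ∀ x ∈ cs, x ≠ ' ') (s p : Int)
    (g : List Int) (gs : List (List Int)) :
    (PySem.List.enumerate cs p).foldl pvStepB (s, s, gs ++ [g]) =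
      (s, s, gs ++ [g ++ ((PySem.List.enumerate cs p).filter (fun q => q.2 == '?')).map (·.1 - s)]) := by
  induction cs generalizing p g with
  | nil => simp [PySem.List.enumerate_nil]
  | cons c cs ih =>
    have hcs : c ≠ ' ' := h c List.mem_cons_self
    rw [PySem.List.enumerate_cons, List.foldl_cons, List.filter_cons]
    by_cases hq : c = '?'
    · subst hq
      rw [pvStepB, if_neg (by simp [hcs]), if_pos (by simp)]
      simp only [ne_eq, not_true_eq_false, if_false, List.dropLast_concat,
        List.getLastD_concat]
      rw [ih (fun x hx => h x (List.mem_cons_of_mem _ hx)) (p + 1) (g ++ [p - s])]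
      simp
    · rw [pvStepB, if_neg (by simp [hcs]), if_neg (by simpa using hq),
        if_neg (by simpa using hq)]
      exact ih (fun x hx => h x (List.mem_cons_of_mem _ hx)) (p + 1) g

-- inside a word that does not yet own a group (last_start ≠ start)
theorem pvSweepFresh (cs : List Char) (h : ∀ x ∈ cs, x ≠ ' ') (s p lms : Int)
    (gs : List (List Int)) (hne : lms ≠ s) :
    (PySem.List.enumerate cs p).foldl pvStepB (s, lms, gs) =
      if '?' ∈ cs then
        (s, s, gs ++ [((PySem.List.enumerate cs p).filter (fun q => q.2 == '?')).map (·.1 - s)])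
      else (s, lms, gs) := by
  induction cs generalizing p with
  | nil => simp [PySem.List.enumerate_nil]
  | cons c cs ih =>
    have hcs : c ≠ ' ' := h c List.mem_cons_self
    simp only [PySem.List.enumerate_cons, List.foldl_cons]
    by_cases hq : c = '?'
    · subst hq
      rw [pvStepB, if_neg (by simp [hcs]), if_pos (by simp), if_pos hne]
      rw [pvSweepIn cs (fun x hx => h x (List.mem_cons_of_mem _ hx)) s (p + 1) [p - s] gs]
      simp
    · rw [pvStepB, if_neg (by simp [hcs]), if_neg (by simpa using hq),
        ih (fun x hx => h x (List.mem_cons_of_mem _ hx)) (p + 1)]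
      by_cases hm : '?' ∈ cs
      · simp [hm, hq, Ne.symm hq]
      · simp [hm, Ne.symm hq]

-- the whole sweep over the words joined by single spaces
theorem pvSweepAll (ws : List (List Char)) (h : ∀ w ∈ ws, ∀ x ∈ w, x ≠ ' ')
    (p lms : Int) (gs : List (List Int)) (hlt : lms < p) :
    ((PySem.List.enumerate ([' '].intercalate ws) p).foldl pvStepB (p, lms, gs)).2.2 =
      gs ++ ((ws.filter (fun w => decide ('?' ∈ w))).map pvQmarkIdxs) := by
  induction ws generalizing p lms gs with
  | nil => simp [List.intercalate, PySem.List.enumerate_nil]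
  | cons w ws ih =>
    have hw : ∀ x ∈ w, x ≠ ' ' := h w List.mem_cons_self
    cases ws with
    | nil =>
      rw [show [' '].intercalate [w] = w by simp [List.intercalate]]
      rw [pvSweepFresh w hw p p lms gs (by omega)]
      by_cases hq : '?' ∈ w
      · simp [hq, pvOffsets_eq]
      · simp [hq]
    | cons w' ws' =>
      have hstep : [' '].intercalate (w :: w' :: ws') = w ++ ' ' :: [' '].intercalate (w' :: ws') := by
        simp [List.intercalate]
      rw [hstep, PySem.List.enumerate_append, List.foldl_append,
        pvSweepFresh w hw p p lms gs (by omega)]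
      by_cases hq : '?' ∈ w
      · rw [if_pos hq, PySem.List.enumerate_cons, List.foldl_cons,
          pvStepB, if_pos (by simp)]
        rw [ih (fun v hv => h v (List.mem_cons_of_mem _ hv)) (p + ↑w.length + 1) p
          (gs ++ [((PySem.List.enumerate w p).filter (fun q => q.2 == '?')).map (·.1 - p)])
          (by have := Int.natCast_nonneg w.length; omega)]
        simp [List.filter_cons, hq, pvOffsets_eq]
      · rw [if_neg hq, PySem.List.enumerate_cons, List.foldl_cons,
          pvStepB, if_pos (by simp)]
        rw [ih (fun v hv => h v (List.mem_cons_of_mem _ hv)) (p + ↑w.length + 1) lms gs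
          (by have := Int.natCast_nonneg w.length; omega)]
        simp [List.filter_cons, hq]

-- B's group list is exactly "the '?'-offsets of each missing word, in order"
theorem pvGroups_eq (text : String) :
    ((PySem.List.enumerate text.toList 0).foldl pvStepB (0, -1, [])).2.2 =
      ((PySem.Chars.splitOn text.toList [' ']).filter
        (fun w => PySem.Chars.isIn ['?'] w)).map pvQmarkIdxs := by
  have hws : [' '].intercalate (List.splitOn ' ' text.toList) = text.toList :=
    List.intercalate_splitOn text.toList ' '
  have hnos : ∀ w ∈ List.splitOn ' ' text.toList, ∀ x ∈ w, x ≠ ' ' := by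
    intro w hw x hx
    have := pvMem_splitOnP (· == ' ') text.toList w hw x hx
    simpa using this
  have := pvSweepAll (List.splitOn ' ' text.toList) hnos 0 (-1) [] (by omega)
  rw [hws] at this
  rw [this, pvSplitOn_eq, List.nil_append]
  congr 1
  apply List.filter_congr
  intro w _
  by_cases hb : PySem.Chars.isIn ['?'] w = true
  · simp [hb, (pvIsIn_iff w).mp hb]
  · have hb' : PySem.Chars.isIn ['?'] w = false := by simpa using hb
    simp [hb', (pvIsIn_iff w).not.mp (by simp [hb'])]

-- ===== VERDICT (by name: the statement is the Claim_ definition above) =====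
theorem get_missing_idxs_py_spec : Claim_equal_get_missing_idxs_py := by
  intro pred_idx text _
  unfold Spec_get_missing_idxs_py get_missing_idxs_py get_missing_idxs_py_alt
  rw [pvGoA_eq]
  have h : pred_idx - (-1) - 1 = pred_idx := by omega
  rw [h]
  simp only [pvGroups_eq, List.length_map, List.getElem?_map]
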